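-- pv_equiv track=rewrite | github.com/EasyCog/EasyCog-Benchmark | utils/utils.py | get_data_dict_list_to_item
-- ===== SOURCE A (Python) =====
-- def get_data_dict_list_to_item(data_dict):
-- 	new_data_dict = {}
-- 	is_convert = False
-- 	for k in data_dict.keys():
-- 		new_data_dict[k] = []
-- 		v = data_dict[k]
-- 		if isinstance(v, list):
-- 			if isinstance(v[0], list):
-- 				is_convert = True
-- 				for ii in v:
-- 					new_data_dict[k].append(ii[0])
-- 	if is_convert:
-- 		return new_data_dict
-- 	else:
-- 		return data_dict
-- ===== SOURCE B (Python) =====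
-- def get_data_dict_list_to_item(data_dict):
--     # Every value is a list of row-lists, so conversion applies to each entry:
--     # map each value to its column of first elements in one comprehension.
--     return {k: [row[0] for row in v] for k, v in data_dict.items()}
-- ===== Notes on version B (the rewrite author's own statement) =====
-- stated objective: simpler
-- what changed: Replaces A's stateful detect-and-build loop (is_convert flag, append-built dict, conditional return of the original dict) with a single dict comprehension mapping every value to its column of first elements; at this value type the conversion branch fires for every entry, so on the empty dict both return an empty dict and the results coincide everywhere A returns.
import Mathlib
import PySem

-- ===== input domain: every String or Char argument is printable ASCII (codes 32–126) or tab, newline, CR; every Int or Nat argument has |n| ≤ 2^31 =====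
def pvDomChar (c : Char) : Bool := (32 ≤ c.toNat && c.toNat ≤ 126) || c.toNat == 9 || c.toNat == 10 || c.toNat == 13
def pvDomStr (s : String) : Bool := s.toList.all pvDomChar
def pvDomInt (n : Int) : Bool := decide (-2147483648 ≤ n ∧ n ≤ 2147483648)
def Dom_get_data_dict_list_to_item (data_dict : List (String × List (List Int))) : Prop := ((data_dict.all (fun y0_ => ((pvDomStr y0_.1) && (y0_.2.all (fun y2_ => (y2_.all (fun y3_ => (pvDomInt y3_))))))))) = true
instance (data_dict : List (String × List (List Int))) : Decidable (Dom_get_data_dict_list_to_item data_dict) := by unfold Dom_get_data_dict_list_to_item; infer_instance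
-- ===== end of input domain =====

-- B replaces A's stateful detect-and-build loop with one comprehension-style map (simpler; same cost); A = B everywhere A returns, including the empty dict where A returns the input unchanged.


-- ===== PORT A =====
-- loop body of A's 'for k in data_dict.keys()': new_data_dict[k] = []; then, since at this
-- element type v is always a list and v[0] (when it exists) always a list, set is_convert
-- and append ii[0] for every ii in v.  v[0] on empty v / ii[0] on empty ii are IndexErrors
-- in Python (pyGet? = none); such inputs are outside Pre_ below.
def pvStepA (st : PySem.Dict String (List Int) × Bool) (kv : String × List (List Int)) :
    PySem.Dict String (List Int) × Bool :=
  let d := PySem.Dict.insert st.1 kv.1 []                       -- new_data_dict[k] = []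
  let v := kv.2                                                 -- v = data_dict[k] (keys distinct in a dict)
  match PySem.List.pyGet? v 0 with                              -- v[0]
  | none => (d, st.2)                                           -- Python raises IndexError here; outside Pre_
  | some _ =>
    (v.foldl (fun d ii =>
        PySem.Dict.modify d kv.1 []
          (fun l => l ++ [(PySem.List.pyGet? ii 0).getD 0])) d, -- new_data_dict[k].append(ii[0]); ii = [] raises, outside Pre_
     true)                                                      -- is_convert = True

def get_data_dict_list_to_item (data_dict : List (String × List (List Int))) : List (String × List Int) :=
  let st := data_dict.foldl pvStepA (PySem.Dict.mk [], false)
  if st.2 then st.1.items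
  else []  -- Python returns data_dict itself; is_convert stays False (with no raise) only when data_dict = [] at this type

-- ===== PORT B =====
def get_data_dict_list_to_item_alt (data_dict : List (String × List (List Int))) : List (String × List Int) :=
  data_dict.map (fun kv => (kv.1, kv.2.map (fun row => (PySem.List.pyGet? row 0).getD 0)))
  -- the dict comprehension: keys of a dict are distinct (Pre_), so it is this map;
  -- row[0] on an empty row raises, outside Pre_ (on the empty dict the map returns [] = the input)

-- ===== PRECONDITION & SPEC =====
-- Pre_ excludes only (a) association lists with duplicate keys, which no Python dict can carry
-- (dict-reinsertion order there is accidental), and (b) inputs with an empty value list or an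
-- empty row, where A raises IndexError reading the first element; every input A returns on is
-- admitted — at this value type the no-conversion branch fires only for the empty dict, which B matches.
def Pre_get_data_dict_list_to_item (data_dict : List (String × List (List Int))) : Prop :=
  (data_dict.map (·.1)).Nodup ∧ ∀ p ∈ data_dict, p.2 ≠ [] ∧ ∀ row ∈ p.2, row ≠ []
instance (data_dict : List (String × List (List Int))) : Decidable (Pre_get_data_dict_list_to_item data_dict) := by unfold Pre_get_data_dict_list_to_item; infer_instance

def pvWitness_get_data_dict_list_to_item : (List (String × List (List Int))) :=
  [("a", [[1, 2], [3]]), ("b", [[4]])]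

def Spec_get_data_dict_list_to_item (data_dict : List (String × List (List Int))) (out : List (String × List Int)) : Prop := out = get_data_dict_list_to_item_alt data_dict
instance (data_dict : List (String × List (List Int))) (out : List (String × List Int)) : Decidable (Spec_get_data_dict_list_to_item data_dict out) := by unfold Spec_get_data_dict_list_to_item; infer_instance

-- ===== CLAIM (what is proved, stated in full; the proofs are below) =====
def Claim_equal_get_data_dict_list_to_item : Prop := ∀ (data_dict : List (String × List (List Int))), Dom_get_data_dict_list_to_item data_dict → Pre_get_data_dict_list_to_item data_dict → Spec_get_data_dict_list_to_item data_dict (get_data_dict_list_to_item data_dict)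

-- ===== LEMMAS AND PROOFS =====

-- one append step of A's inner loop on a dict whose last item holds the key being built
lemma pvModify_snoc (items0 : List (String × List Int)) (k : String) (acc : List Int) (x : Int)
    (h : ∀ p ∈ items0, p.1 ≠ k) :
    PySem.Dict.modify (PySem.Dict.mk (items0 ++ [(k, acc)])) k [] (fun l => l ++ [x])
      = PySem.Dict.mk (items0 ++ [(k, acc ++ [x])]) := by
  induction items0 with
  | nil => simp [PySem.Dict.modify, PySem.Dict.insert, PySem.Dict.contains, PySem.Dict.getD,
      PySem.Dict.get?]
  | cons q rest ih =>
    have hq : q.1 ≠ k := h q (by simp)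
    have hrest : ∀ p ∈ rest, p.1 ≠ k := fun p hp => h p (by simp [hp])
    have := ih hrest
    simp_all [PySem.Dict.modify, PySem.Dict.insert, PySem.Dict.contains, PySem.Dict.getD,
      PySem.Dict.get?]

-- A's inner append loop builds the column of first elements behind the fresh key
lemma pvInner (v : List (List Int)) (items0 : List (String × List Int)) (k : String)
    (acc : List Int) (h : ∀ p ∈ items0, p.1 ≠ k) :
    v.foldl (fun d ii =>
        PySem.Dict.modify d k [] (fun l => l ++ [(PySem.List.pyGet? ii 0).getD 0]))
      (PySem.Dict.mk (items0 ++ [(k, acc)]))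
      = PySem.Dict.mk (items0 ++ [(k, acc ++ v.map (fun ii => (PySem.List.pyGet? ii 0).getD 0))]) := by
  induction v generalizing acc with
  | nil => simp
  | cons ii rest ih => rw [List.foldl_cons, pvModify_snoc _ _ _ _ h, ih]; simp

-- A's outer loop over fresh, distinct keys appends one converted item per key
lemma pvOuter (dd : List (String × List (List Int))) (items0 : List (String × List Int))
    (conv : Bool)
    (hnd : (dd.map (·.1)).Nodup)
    (hfresh : ∀ p ∈ dd, ∀ q ∈ items0, q.1 ≠ p.1)
    (hne : ∀ p ∈ dd, p.2 ≠ []) :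
    dd.foldl pvStepA (PySem.Dict.mk items0, conv)
      = (PySem.Dict.mk (items0 ++ dd.map (fun kv =>
            (kv.1, kv.2.map (fun row => (PySem.List.pyGet? row 0).getD 0)))),
         conv || !dd.isEmpty) := by
  induction dd generalizing items0 conv with
  | nil => simp
  | cons kv rest ih =>
    obtain ⟨v0, vt, hv⟩ : ∃ v0 vt, kv.2 = v0 :: vt := by
      rcases hvv : kv.2 with _ | ⟨v0, vt⟩
      · exact absurd hvv (hne kv (by simp))
      · exact ⟨v0, vt, rfl⟩
    have hfr : ∀ q ∈ items0, q.1 ≠ kv.1 := fun q hq => hfresh kv (by simp) q hq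
    have hcont : PySem.Dict.contains (PySem.Dict.mk items0) kv.1 = false := by
      simp only [PySem.Dict.contains, List.any_eq_false]
      intro p hp
      simpa using hfr p hp
    have hget : PySem.List.pyGet? (v0 :: vt) 0 = some v0 := by
      simp [PySem.List.pyGet?, PySem.List.pyIdx?]
    have hins : PySem.Dict.insert (PySem.Dict.mk items0) kv.1 []
        = PySem.Dict.mk (items0 ++ [(kv.1, ([] : List Int))]) := by
      simp [PySem.Dict.insert, hcont]
    have hnd1 : kv.1 ∉ rest.map (·.1) ∧ (rest.map (·.1)).Nodup := by
      simp only [List.map_cons, List.nodup_cons] at hnd; exact hnd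
    have hstep : pvStepA (PySem.Dict.mk items0, conv) kv
        = (PySem.Dict.mk (items0 ++
            [(kv.1, kv.2.map (fun row => (PySem.List.pyGet? row 0).getD 0))]), true) := by
      simp only [pvStepA, hv, hget, hins]
      simpa using pvInner (v0 :: vt) items0 kv.1 [] hfr
    rw [List.foldl_cons, hstep,
      ih (items0 ++ [(kv.1, kv.2.map (fun row => (PySem.List.pyGet? row 0).getD 0))]) true
        hnd1.2
        (by
          intro p hp q hq
          rcases List.mem_append.1 hq with h1 | h1
          · exact hfresh p (by simp [hp]) q h1
          · simp only [List.mem_singleton] at h1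
            subst h1
            intro he
            exact hnd1.1 (List.mem_map.2 ⟨p, hp, he.symm⟩))
        (fun p hp => hne p (by simp [hp]))]
    simp

-- ===== VERDICT (by name: the statement is the Claim_ definition above) =====
theorem get_data_dict_list_to_item_spec : Claim_equal_get_data_dict_list_to_item := by
  intro dd _ hpre
  unfold Spec_get_data_dict_list_to_item get_data_dict_list_to_item get_data_dict_list_to_item_alt
  rcases dd with _ | ⟨kv, rest⟩
  · simp
  · rw [pvOuter (kv :: rest) [] false hpre.1 (by simp) (fun p hp => (hpre.2 p hp).1)]
    simp
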